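-- pv_equiv track=rewrite | github.com/mjs375/Portfolio | 4kyu/StripComments.py | solution
-- ===== SOURCE A (Python) =====
-- def solution(s, comments):
--     lines = s.split('\n') #split string into list of lines
--     for i, line in enumerate(lines): #iterate each line
--         for comment in comments: #check both '#' and '!' (or whatever)
--             end = line.find(comment) #get index of first instance of comment
--             if end == -1:
--                 pass # find() returns '-1' if no match
--             else: #comment found...:
--                 line = line[:end] #cut off line just before 'end' (index 'stop' is stop-1)
--         lines[i] = line.strip(" ") #glue on
--     return '\n'.join(lines) #tie together all lines again, glued by '\n'
-- ===== SOURCE B (Python) =====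
-- def solution(s, comments):
--     # Marker-major pass: instead of rewriting each line once per marker, split the
--     # text once, keep a parallel table of numeric cut bounds (one per line), and
--     # sweep the text one MARKER at a time, tightening the bounds; the strings are
--     # never mutated and each line is sliced and stripped exactly once at the end.
--     # (A marker's first occurrence in the original line is the only one that can
--     # apply: a later occurrence never fits under a shrinking bound.)
--     lines = s.split('\n')
--     bounds = [len(line) for line in lines]
--     for c in comments:
--         for j, line in enumerate(lines):
--             f = line.find(c)
--             if f != -1 and f + len(c) <= bounds[j]:
--                 bounds[j] = f
--     return '\n'.join(line[:b].strip(' ') for line, b in zip(lines, bounds))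
-- ===== Notes on version B (the rewrite author's own statement) =====
-- stated objective: alternative
-- what changed: A walks line by line, repeatedly truncating the line string and re-scanning the shrunken string for every marker; B inverts the loops: it splits once, keeps a parallel table of numeric cut bounds (one per line), sweeps the text one marker at a time tightening the bounds with a single find of each marker's first occurrence in the ORIGINAL line (a later occurrence never fits under a shrinking bound), and slices/strips each line exactly once at the end.
import Mathlib
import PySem

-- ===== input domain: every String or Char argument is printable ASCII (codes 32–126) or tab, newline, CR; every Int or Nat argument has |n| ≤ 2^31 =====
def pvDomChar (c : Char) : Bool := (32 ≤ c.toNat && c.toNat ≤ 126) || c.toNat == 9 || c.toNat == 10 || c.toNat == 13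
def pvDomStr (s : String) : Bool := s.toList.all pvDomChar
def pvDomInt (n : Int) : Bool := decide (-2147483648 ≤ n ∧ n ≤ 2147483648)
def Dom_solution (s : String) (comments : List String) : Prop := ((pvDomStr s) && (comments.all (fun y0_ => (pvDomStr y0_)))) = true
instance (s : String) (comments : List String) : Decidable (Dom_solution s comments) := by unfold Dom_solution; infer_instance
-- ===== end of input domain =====

-- B inverts A's loops: instead of rewriting each line once per marker, it sweeps the
-- text one marker at a time, tightening a table of numeric cut bounds (one per line)
-- with each marker's first occurrence in the original line, slicing each line once
-- at the end (objective: alternative).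

-- ===== PORT A =====
-- inner loop body: end = line.find(comment); if end == -1: pass else: line = line[:end]
def aTrunc (line : List Char) (comment : String) : List Char :=
  let e := PySem.Chars.find line comment.toList
  if e = -1 then line else PySem.Chars.slice line none (some e)

def solution (s : String) (comments : List String) : String :=
  let lines := PySem.Chars.splitOn s.toList "\n".toList
  -- 'for i, line in enumerate(lines): … lines[i] = line.strip(" ")' replaces each
  -- element in place: ported as a map over the list
  let lines := lines.map (fun line =>
    PySem.Chars.stripChars (comments.foldl aTrunc line) " ".toList)
  String.ofList (PySem.Chars.join "\n".toList lines)

-- ===== PORT B =====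
-- inner loop body: f = line.find(c); if f != -1 and f + len(c) <= bounds[j]: bounds[j] = f
def bUpd (line : List Char) (n : Int) (c : String) : Int :=
  if PySem.Chars.find line c.toList ≠ -1 ∧ PySem.Chars.find line c.toList + (c.toList.length : Int) ≤ n
  then PySem.Chars.find line c.toList else n

def solution_alt (s : String) (comments : List String) : String :=
  let lines := PySem.Chars.splitOn s.toList "\n".toList
  let bounds := lines.map (fun line => (line.length : Int))
  -- 'for c in comments: for j, line in enumerate(lines): … bounds[j] = f' updates the
  -- bounds table elementwise in place: ported as a map over the zip with lines
  let bounds := comments.foldl (fun bs c => (lines.zip bs).map (fun p => bUpd p.1 p.2 c)) bounds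
  String.ofList (PySem.Chars.join "\n".toList
    ((lines.zip bounds).map (fun p =>
      PySem.Chars.stripChars (PySem.Chars.slice p.1 none (some p.2)) " ".toList)))

-- ===== PRECONDITION & SPEC =====
def Spec_solution (s : String) (comments : List String) (out : String) : Prop := out = solution_alt s comments
instance (s : String) (comments : List String) (out : String) : Decidable (Spec_solution s comments out) := by unfold Spec_solution; infer_instance

-- ===== CLAIM (what is proved, stated in full; the proofs are below) =====
def Claim_equal_solution : Prop := ∀ (s : String) (comments : List String), Dom_solution s comments → Spec_solution s comments (solution s comments)

-- ===== LEMMAS AND PROOFS =====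

-- find in a prefix l.take n, characterised by find on the whole line:
-- the first occurrence in l.take n is l's first occurrence when it fits, else absent.
lemma bounded_find (l c : List Char) (n : Nat) :
    PySem.Chars.find (l.take n) c =
      if 0 ≤ PySem.Chars.find l c ∧ PySem.Chars.find l c + (c.length : Int) ≤ (n : Int)
      then PySem.Chars.find l c else -1 := by
  have hocc : ∀ i : Nat, c <+: (l.take n).drop i ↔ (c <+: l.drop i ∧ c.length ≤ n - i) := by
    intro i
    rw [List.drop_take, List.prefix_take_iff]
  split_ifs with h
  · -- l's first occurrence fits inside the prefix
    obtain ⟨hF0, hFfit⟩ := h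
    obtain ⟨hFpre, hFmin⟩ := PySem.Chars.find_spec hF0
    have hFn : (PySem.Chars.find l c).toNat + c.length ≤ n := by omega
    have hmatch : c <+: (l.take n).drop (PySem.Chars.find l c).toNat := by
      rw [hocc]; exact ⟨hFpre, by omega⟩
    have hne : PySem.Chars.find (l.take n) c ≠ -1 := by
      rw [PySem.Chars.find_ne_neg_one_iff, ← PySem.Chars.isIn_iff_infix,
        ← PySem.Chars.exists_prefix_drop_iff_isIn]
      exact ⟨_, hmatch⟩
    have hG0 : 0 ≤ PySem.Chars.find (l.take n) c := by
      have := PySem.Chars.neg_one_le_find (l.take n) c; omega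
    obtain ⟨hGpre, hGmin⟩ := PySem.Chars.find_spec hG0
    have hGl : c <+: l.drop (PySem.Chars.find (l.take n) c).toNat := ((hocc _).mp hGpre).1
    have h1 : ¬ (PySem.Chars.find (l.take n) c).toNat < (PySem.Chars.find l c).toNat :=
      fun hlt => hFmin _ hlt hGl
    have h2 : ¬ (PySem.Chars.find l c).toNat < (PySem.Chars.find (l.take n) c).toNat :=
      fun hlt => hGmin _ hlt hmatch
    omega
  · -- no occurrence of c fits inside l.take n
    rw [PySem.Chars.find_eq_neg_one_iff, ← PySem.Chars.isIn_iff_infix,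
      ← PySem.Chars.exists_prefix_drop_iff_isIn]
    rintro ⟨i, hi⟩
    obtain ⟨hil, hlen⟩ := (hocc i).mp hi
    have hF0 : 0 ≤ PySem.Chars.find l c := by
      by_contra hneg
      have hFm1 : PySem.Chars.find l c = -1 := by
        have := PySem.Chars.neg_one_le_find l c; omega
      rw [PySem.Chars.find_eq_neg_one_iff, ← PySem.Chars.isIn_iff_infix,
        ← PySem.Chars.exists_prefix_drop_iff_isIn] at hFm1
      exact hFm1 ⟨i, hil⟩
    obtain ⟨hFpre, hFmin⟩ := PySem.Chars.find_spec hF0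
    have hiF : ¬ i < (PySem.Chars.find l c).toNat := fun hlt => hFmin i hlt hil
    by_cases hin : i ≤ n
    · exact h ⟨hF0, by omega⟩
    · -- i past the prefix: only c = [] matches there, but then find l c = 0 fits
      have hc : c = [] := by
        have : c.length = 0 := by omega
        exact List.length_eq_zero_iff.mp this
      subst hc
      have hz : PySem.Chars.find l [] = 0 := PySem.Chars.find_nil l
      exact h ⟨hF0, by simp [hz]⟩

-- the folded cut bound stays in [0, n] and taking it reproduces A's truncation fold
lemma fold_inv (l : List Char) (cs : List String) : ∀ (n : Nat), n ≤ l.length →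
    0 ≤ cs.foldl (bUpd l) (n : Int) ∧ cs.foldl (bUpd l) (n : Int) ≤ (n : Int) ∧
      cs.foldl aTrunc (l.take n) = l.take (cs.foldl (bUpd l) (n : Int)).toNat := by
  induction cs with
  | nil =>
    intro n hn
    simp only [List.foldl_nil, Int.toNat_natCast]
    exact ⟨by omega, le_refl _, by trivial⟩
  | cons c cs ih =>
    intro n hn
    simp only [List.foldl_cons]
    by_cases h : 0 ≤ PySem.Chars.find l c.toList ∧
        PySem.Chars.find l c.toList + ((c.toList.length : Int)) ≤ (n : Int)
    · -- the marker cuts: both sides continue from the marker's index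
      obtain ⟨hf0, hfit⟩ := h
      have hne0 : ¬ (PySem.Chars.find l c.toList = -1) := by omega
      have hb : bUpd l (n : Int) c = PySem.Chars.find l c.toList := by
        unfold bUpd
        rw [if_pos ⟨hne0, hfit⟩]
      have hbf : PySem.Chars.find (l.take n) c.toList = PySem.Chars.find l c.toList := by
        rw [bounded_find, if_pos ⟨hf0, hfit⟩]
      have ha : aTrunc (l.take n) c = l.take (PySem.Chars.find l c.toList).toNat := by
        unfold aTrunc
        rw [hbf, if_neg hne0, PySem.Chars.slice_eq_listSlice,
          PySem.List.slice_to (l.take n) hf0, List.take_take]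
        congr 1
        omega
      have hFn : (PySem.Chars.find l c.toList).toNat ≤ n := by omega
      obtain ⟨h1, h2, h3⟩ := ih (PySem.Chars.find l c.toList).toNat (le_trans hFn hn)
      rw [hb, ha]
      have hcast : ((PySem.Chars.find l c.toList).toNat : Int) = PySem.Chars.find l c.toList := by
        omega
      rw [hcast] at h1 h2 h3
      exact ⟨h1, by omega, h3⟩
    · -- the marker does not cut inside the current bound: both sides keep n
      have hb : bUpd l (n : Int) c = (n : Int) := by
        unfold bUpd
        rw [if_neg]
        intro hcon
        have := PySem.Chars.neg_one_le_find l c.toList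
        exact h ⟨by omega, hcon.2⟩
      have hbf : PySem.Chars.find (l.take n) c.toList = -1 := by
        rw [bounded_find, if_neg h]
      have ha : aTrunc (l.take n) c = l.take n := by
        unfold aTrunc
        rw [hbf, if_pos rfl]
      rw [hb, ha]
      exact ih n hn

-- per line, A's truncation fold is one slice at B's folded cut bound
lemma line_eq (l : List Char) (cs : List String) :
    cs.foldl aTrunc l = PySem.Chars.slice l none (some (cs.foldl (bUpd l) (l.length : Int))) := by
  obtain ⟨h1, _, h3⟩ := fold_inv l cs l.length (le_refl _)
  rw [PySem.Chars.slice_eq_listSlice, PySem.List.slice_to l h1, ← h3, List.take_length]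

-- zipping a list with a mapped copy of itself pairs each element with its image
lemma zip_self_map {α β : Type} (l : List α) (g : α → β) :
    l.zip (l.map g) = l.map (fun a => (a, g a)) := by
  induction l with
  | nil => rfl
  | cons a l ih => simp [ih]

-- the marker-major fold over a bounds table of shape 'lines.map g' keeps that shape,
-- each line folding its own bound: the loop interchange is sound
lemma interchange (lines : List (List Char)) :
    ∀ (cs : List String) (g : List Char → Int),
      cs.foldl (fun bs c => (lines.zip bs).map (fun p => bUpd p.1 p.2 c)) (lines.map g) =
        lines.map (fun l => cs.foldl (bUpd l) (g l)) := by
  intro cs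
  induction cs with
  | nil => intro g; simp
  | cons c cs ih =>
    intro g
    rw [List.foldl_cons]
    have hstep : (lines.zip (lines.map g)).map (fun p => bUpd p.1 p.2 c) =
        lines.map (fun l => bUpd l (g l) c) := by
      rw [zip_self_map, List.map_map]
      rfl
    rw [hstep, ih (fun l => bUpd l (g l) c)]
    simp only [List.foldl_cons]

-- ===== VERDICT (by name: the statement is the Claim_ definition above) =====
theorem solution_spec : Claim_equal_solution := by
  intro s comments _
  unfold Spec_solution solution solution_alt
  show String.ofList (PySem.Chars.join "\n".toList _) = String.ofList (PySem.Chars.join "\n".toList _)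
  set lines := PySem.Chars.splitOn s.toList "\n".toList with hl
  rw [interchange lines comments (fun line => (line.length : Int))]
  rw [zip_self_map, List.map_map]
  refine congrArg _ (congrArg _ (List.map_congr_left ?_))
  intro l _
  simp only [Function.comp]
  rw [line_eq]
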